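-- pv_equiv track=rewrite | github.com/H4rr1ss/-LFP-Proyecto1-202103718 | database.py | __validaciones_transiciones
-- ===== SOURCE A (Python) =====
-- def __validaciones_transiciones(lista_transiciones):
--     for transicion1 in lista_transiciones:
--         contador = 0
--
--         for transicion2 in lista_transiciones:
--
--             if transicion1[0:3] == transicion2[0:3]:
--                 contador += 1
--
--         if contador == 2:
--             return False
--
--     return True
-- ===== SOURCE B (Python) =====
-- def __validaciones_transiciones(lista_transiciones):
--     # count each 3-prefix in one dict pass, then check no count is exactly 2
--     conteos = {}
--     for t in lista_transiciones:
--         p = tuple(t[0:3])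
--         conteos[p] = conteos.get(p, 0) + 1
--     return all(c != 2 for c in conteos.values())
-- ===== Notes on version B (the rewrite author's own statement) =====
-- stated objective: alternative
-- what changed: Replaced the nested rescanning of the whole list for each transition by a single pass that tallies each 3-prefix in a dict, then checks that no tally is exactly 2; it trades A's early return for a one-pass count.
import Mathlib
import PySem

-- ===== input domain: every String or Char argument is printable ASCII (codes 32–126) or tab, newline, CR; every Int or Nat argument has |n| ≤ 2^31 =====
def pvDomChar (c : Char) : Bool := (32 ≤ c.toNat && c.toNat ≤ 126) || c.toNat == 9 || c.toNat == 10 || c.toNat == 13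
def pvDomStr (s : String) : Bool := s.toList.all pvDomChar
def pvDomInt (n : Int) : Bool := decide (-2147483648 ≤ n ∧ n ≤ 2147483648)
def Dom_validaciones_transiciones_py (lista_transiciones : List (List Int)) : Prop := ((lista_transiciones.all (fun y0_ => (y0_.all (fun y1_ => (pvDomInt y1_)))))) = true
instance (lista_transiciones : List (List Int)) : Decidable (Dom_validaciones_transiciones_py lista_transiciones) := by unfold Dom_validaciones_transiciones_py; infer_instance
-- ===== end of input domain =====

-- B replaces A's nested rescanning by one dict-counting pass over the 3-prefixes (objective: alternative decomposition).

-- ===== PORT A =====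
-- inner loop: contador = 0; for transicion2 in lista: if t1[0:3] == t2[0:3]: contador += 1
def pvContadorA (transicion1 : List Int) (lista_transiciones : List (List Int)) : Int :=
  lista_transiciones.foldl
    (fun contador transicion2 =>
      if PySem.List.slice transicion1 (some 0) (some 3) == PySem.List.slice transicion2 (some 0) (some 3)
      then contador + 1 else contador) 0

-- outer loop with early 'return False' when contador == 2
def pvBucleA (lista_transiciones : List (List Int)) : List (List Int) → Bool
  | [] => true
  | transicion1 :: resto =>
      if pvContadorA transicion1 lista_transiciones == 2 then false
      else pvBucleA lista_transiciones resto

def validaciones_transiciones_py (lista_transiciones : List (List Int)) : Bool :=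
  pvBucleA lista_transiciones lista_transiciones

-- ===== PORT B =====
-- conteos = {}; for t in lista: p = t[0:3]; conteos[p] = conteos.get(p, 0) + 1
def pvConteosB (lista_transiciones : List (List Int)) : PySem.Dict (List Int) Int :=
  lista_transiciones.foldl
    (fun conteos t =>
      conteos.insert (PySem.List.slice t (some 0) (some 3))
        (conteos.getD (PySem.List.slice t (some 0) (some 3)) 0 + 1))
    PySem.Dict.empty

-- all(c != 2 for c in conteos.values())
def validaciones_transiciones_py_alt (lista_transiciones : List (List Int)) : Bool :=
  (pvConteosB lista_transiciones).values.all (fun c => c != 2)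

-- ===== PRECONDITION & SPEC =====
def Spec_validaciones_transiciones_py (lista_transiciones : List (List Int)) (out : Bool) : Prop := out = validaciones_transiciones_py_alt lista_transiciones
instance (lista_transiciones : List (List Int)) (out : Bool) : Decidable (Spec_validaciones_transiciones_py lista_transiciones out) := by unfold Spec_validaciones_transiciones_py; infer_instance

-- ===== CLAIM (what is proved, stated in full; the proofs are below) =====
def Claim_equal_validaciones_transiciones_py : Prop := ∀ (lista_transiciones : List (List Int)), Dom_validaciones_transiciones_py lista_transiciones → Spec_validaciones_transiciones_py lista_transiciones (validaciones_transiciones_py lista_transiciones)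

-- ===== LEMMAS AND PROOFS =====

-- the 3-prefix map of the list
def pvPrefs (l : List (List Int)) : List (List Int) :=
  l.map (fun t => PySem.List.slice t (some 0) (some 3))

-- A's inner counter is the count of t1's prefix among all prefixes
theorem pvContadorA_eq (t1 : List Int) (l : List (List Int)) :
    pvContadorA t1 l = ((pvPrefs l).count (PySem.List.slice t1 (some 0) (some 3)) : Int) := by
  unfold pvContadorA pvPrefs
  rw [PySem.List.foldl_if_add_one]
  simp [List.count, List.countP_map, Function.comp_def, BEq.comm]

-- A's outer loop returns true iff no listed transition has prefix-count 2
theorem pvBucleA_eq_true_iff (l rest : List (List Int)) :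
    pvBucleA l rest = true ↔
      ∀ t1 ∈ rest, ((pvPrefs l).count (PySem.List.slice t1 (some 0) (some 3)) : Int) ≠ 2 := by
  induction rest with
  | nil => simp [pvBucleA]
  | cons t r ih =>
      simp only [pvBucleA, List.mem_cons]
      rw [pvContadorA_eq]
      by_cases h : ((pvPrefs l).count (PySem.List.slice t (some 0) (some 3)) : Int) = 2
      · rw [beq_iff_eq.mpr h, if_pos rfl]
        constructor
        · intro hf; cases hf
        · intro hall; exact absurd h (hall t (Or.inl rfl))
      · rw [beq_eq_false_iff_ne.mpr h]
        rw [show (if (false = true) then false else pvBucleA l r) = pvBucleA l r from if_neg (by simp)]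
        rw [ih]
        constructor
        · rintro hall t1 (rfl | ht1)
          · exact h
          · exact hall t1 ht1
        · intro hall t1 ht1; exact hall t1 (Or.inr ht1)

-- B's dict is the counter of the prefixes
theorem pvConteosB_eq (l : List (List Int)) :
    pvConteosB l = PySem.Dict.counter (pvPrefs l) := by
  unfold pvConteosB pvPrefs
  rw [← PySem.Dict.foldl_insert_getD_add_one_eq_counter, List.foldl_map]

theorem pvAlt_eq_true_iff (l : List (List Int)) :
    validaciones_transiciones_py_alt l = true ↔
      ∀ p ∈ pvPrefs l, ((pvPrefs l).count p : Int) ≠ 2 := by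
  unfold validaciones_transiciones_py_alt
  rw [pvConteosB_eq]
  simp only [PySem.Dict.values, PySem.Dict.items_counter, List.map_map, List.all_map]
  simp [Function.comp_def, PySem.Set.mem_ofList]

-- ===== VERDICT (by name: the statement is the Claim_ definition above) =====
theorem validaciones_transiciones_py_spec : Claim_equal_validaciones_transiciones_py := by
  intro l _
  unfold Spec_validaciones_transiciones_py validaciones_transiciones_py
  rw [Bool.eq_iff_iff, pvBucleA_eq_true_iff, pvAlt_eq_true_iff]
  constructor
  · intro h p hp
    unfold pvPrefs at hp
    rcases List.mem_map.mp hp with ⟨t, ht, rfl⟩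
    exact h t ht
  · intro h t ht
    exact h _ (List.mem_map_of_mem ht)
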